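-- pv_equiv track=rewrite | github.com/roadsidegravel/cyber-dojo | 002 reverse roman Python unittest refactored/numerals.py | add_up_identical_neighbours
-- ===== SOURCE A (Python) =====
-- def add_up_identical_neighbours(numberList):
--     result = []
--     neighbourSum = 0
--     for index, number in enumerate(numberList):
--         if index == len(numberList) -1:
--             nextNumber = 0
--         else:
--             nextNumber = numberList[index + 1]
--         neighbourSum += number
--         if number != nextNumber:
--             result.append(neighbourSum)
--             neighbourSum = 0
--     return result
-- ===== SOURCE B (Python) =====
-- def add_up_identical_neighbours(numberList):
--     # Single pass: maintain runs as [value, sum] pairs, merging each number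
--     # into the last run when it has the same value.
--     runs = []
--     for n in numberList:
--         if runs and runs[-1][0] == n:
--             runs[-1][1] += n
--         else:
--             runs.append([n, n])
--     return [s for _, s in runs]
-- ===== Notes on version B (the rewrite author's own statement) =====
-- stated objective: simpler
-- what changed: Replaces the index-and-lookahead loop (comparing each element with numberList[index+1] and a 0 sentinel past the end) by a single pass merging each element into a list of (value, sum) runs.
-- intended difference: On inputs whose last element is 0, A's 0 sentinel past the end makes it silently drop the sum of the trailing run of zeros (one fewer entry), while B reports that run's sum 0 like any other run, which is the intended run-sum value. — e.g. on add_up_identical_neighbours([1, 0]): A returns [1], B returns [1, 0]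
import Mathlib
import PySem

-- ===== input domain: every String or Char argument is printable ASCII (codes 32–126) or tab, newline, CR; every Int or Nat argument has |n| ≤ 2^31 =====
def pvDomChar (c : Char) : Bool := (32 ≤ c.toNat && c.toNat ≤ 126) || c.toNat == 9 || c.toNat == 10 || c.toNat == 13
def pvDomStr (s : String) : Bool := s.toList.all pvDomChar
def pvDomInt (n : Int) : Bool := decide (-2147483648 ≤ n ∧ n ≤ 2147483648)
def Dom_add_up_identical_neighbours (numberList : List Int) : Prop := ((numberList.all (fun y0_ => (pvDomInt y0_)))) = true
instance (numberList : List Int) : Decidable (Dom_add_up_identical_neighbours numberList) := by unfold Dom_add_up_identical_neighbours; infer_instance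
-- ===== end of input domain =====

-- B replaces A's index-and-lookahead loop (0 sentinel past the end) by a single pass that
-- merges each element into a list of (value, sum) runs — simpler, same cost; B differs from A
-- only on lists ending in 0, where A drops the trailing zero run's sum (see D_ below).


-- ===== PORT A =====
-- A's for-loop over enumerate(numberList) with state (result, neighbourSum), as structural
-- recursion on the remaining list: `numberList[index+1]` (read only when index < len-1) is
-- exactly the head of the remaining tail, and `index == len(numberList)-1` exactly when the
-- tail is empty — exact on all inputs.
def goA : List Int → Int → List Int → List Int
  | acc, _, [] => acc
  | acc, s, x :: rest =>
      let next : Int := match rest with | [] => 0 | y :: _ => y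
      if x ≠ next then goA (acc ++ [s + x]) 0 rest else goA acc (s + x) rest

def add_up_identical_neighbours (numberList : List Int) : List Int :=
  goA [] 0 numberList

-- ===== PORT B =====
-- merge n into the last run if it has the same value, else start a new run
def altInsert (runs : List (Int × Int)) (n : Int) : List (Int × Int) :=
  match runs.getLast? with
  | some (v, s) => if v = n then runs.dropLast ++ [(v, s + n)] else runs ++ [(n, n)]
  | none => [(n, n)]

def add_up_identical_neighbours_alt (numberList : List Int) : List Int :=
  (numberList.foldl altInsert []).map Prod.snd

-- ===== PRECONDITION & SPEC =====
-- On inputs whose last element is 0, A's 0 sentinel past the end makes it silently drop the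
-- sum of the trailing run of zeros (one fewer entry), while B reports that run's sum 0 like
-- any other run, which is the intended run-sum value.
def D_add_up_identical_neighbours (numberList : List Int) : Prop :=
  numberList.getLast? = some 0
instance (numberList : List Int) : Decidable (D_add_up_identical_neighbours numberList) := by
  unfold D_add_up_identical_neighbours; infer_instance

def Spec_add_up_identical_neighbours (numberList : List Int) (out : List Int) : Prop :=
  ¬ D_add_up_identical_neighbours numberList → out = add_up_identical_neighbours_alt numberList
instance (numberList : List Int) (out : List Int) : Decidable (Spec_add_up_identical_neighbours numberList out) := by unfold Spec_add_up_identical_neighbours; infer_instance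

def pvDiffWitness_add_up_identical_neighbours : List Int := [1, 0]
def pvDiffWitnessOut_add_up_identical_neighbours : (List Int) × (List Int) := ([1], [1, 0])

-- ===== CLAIM (what is proved, stated in full; the proofs are below) =====
def Claim_unchanged_add_up_identical_neighbours : Prop := ∀ (numberList : List Int), Dom_add_up_identical_neighbours numberList → Spec_add_up_identical_neighbours numberList (add_up_identical_neighbours numberList)
def Claim_changed_add_up_identical_neighbours : Prop := Dom_add_up_identical_neighbours (pvDiffWitness_add_up_identical_neighbours) ∧ D_add_up_identical_neighbours (pvDiffWitness_add_up_identical_neighbours) ∧ add_up_identical_neighbours (pvDiffWitness_add_up_identical_neighbours) = pvDiffWitnessOut_add_up_identical_neighbours.1 ∧ add_up_identical_neighbours_alt (pvDiffWitness_add_up_identical_neighbours) = pvDiffWitnessOut_add_up_identical_neighbours.2 ∧ pvDiffWitnessOut_add_up_identical_neighbours.1 ≠ pvDiffWitnessOut_add_up_identical_neighbours.2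
def Claim_exact_add_up_identical_neighbours : Prop := ∀ (numberList : List Int), Dom_add_up_identical_neighbours numberList → D_add_up_identical_neighbours numberList → add_up_identical_neighbours numberList ≠ add_up_identical_neighbours_alt numberList

-- ===== LEMMAS AND PROOFS =====

-- prepend a run onto a run list, merging with the first run if values match
def glue (p : Int × Int) : List (Int × Int) → List (Int × Int)
  | [] => [p]
  | (w, t) :: rs => if p.1 = w then (p.1, p.2 + t) :: rs else p :: (w, t) :: rs

-- the run decomposition, built back-to-front
def chop (xs : List Int) : List (Int × Int) :=
  xs.foldr (fun x acc => glue (x, x) acc) []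

-- drop a trailing run of value 0 (what A's 0 sentinel does)
def altFinish (runs : List (Int × Int)) : List (Int × Int) :=
  match runs.getLast? with
  | some (v, _) => if v = 0 then runs.dropLast else runs
  | none => runs

theorem goA_single (acc : List Int) (s x : Int) :
    goA acc s [x] = if x ≠ 0 then acc ++ [s + x] else acc := rfl

theorem goA_cons2 (acc : List Int) (s x y : Int) (r : List Int) :
    goA acc s (x :: y :: r) =
      if x ≠ y then goA (acc ++ [s + x]) 0 (y :: r) else goA acc (s + x) (y :: r) := rfl

theorem glue_ne_nil (p : Int × Int) (t : List (Int × Int)) : glue p t ≠ [] := by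
  cases t with
  | nil => simp [glue]
  | cons q rs => obtain ⟨w, s⟩ := q; simp only [glue]; split <;> simp

theorem glue_glue (v s a : Int) (t : List (Int × Int)) :
    glue (v, s) (glue (v, a) t) = glue (v, s + a) t := by
  cases t with
  | nil => simp [glue]
  | cons q rs =>
    obtain ⟨w, b⟩ := q
    by_cases h : v = w <;> simp [glue, h, add_assoc]

theorem glue_of_ne (v s x a : Int) (t : List (Int × Int)) (h : v ≠ x) :
    glue (v, s) (glue (x, a) t) = (v, s) :: glue (x, a) t := by
  cases t with
  | nil => simp [glue, h]
  | cons q rs =>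
    obtain ⟨w, b⟩ := q
    by_cases hw : x = w
    · subst hw; simp [glue, h]
    · simp [glue, hw, h]

theorem foldl_altInsert (xs : List Int) :
    ∀ (rs : List (Int × Int)) (v s : Int),
      List.foldl altInsert (rs ++ [(v, s)]) xs = rs ++ glue (v, s) (chop xs) := by
  induction xs with
  | nil => intro rs v s; simp [chop, glue]
  | cons x xs ih =>
    intro rs v s
    simp only [List.foldl_cons]
    have hins : altInsert (rs ++ [(v, s)]) x =
        if v = x then rs ++ [(v, s + x)] else (rs ++ [(v, s)]) ++ [(x, x)] := by
      simp [altInsert]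
    by_cases h : v = x
    · subst h
      rw [hins, if_pos rfl, ih rs v (s + v)]
      have hc : chop (v :: xs) = glue (v, v) (chop xs) := by simp [chop]
      rw [hc, glue_glue]
    · rw [hins, if_neg h, ih (rs ++ [(v, s)]) x x]
      have hc : chop (x :: xs) = glue (x, x) (chop xs) := by simp [chop]
      rw [hc, glue_of_ne v s x x (chop xs) h]
      simp

-- B's run list, expressed through glue/chop
theorem alt_eq_chop (x : Int) (rest : List Int) :
    List.foldl altInsert [] (x :: rest) = glue (x, x) (chop rest) := by
  have h1 : List.foldl altInsert [] (x :: rest)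
      = List.foldl altInsert ([] ++ [(x, x)]) rest := by simp [altInsert]
  rw [h1, foldl_altInsert rest [] x x]; simp

theorem goA_acc (xs : List Int) :
    ∀ (acc : List Int) (s : Int), goA acc s xs = acc ++ goA [] s xs := by
  induction xs with
  | nil => intro acc s; simp [goA]
  | cons x rest ih =>
    intro acc s
    cases rest with
    | nil => by_cases h : x = 0 <;> simp [goA_single, h]
    | cons y r =>
      by_cases h : x = y
      · rw [goA_cons2, goA_cons2, if_neg (by simp [h]), if_neg (by simp [h]),
          ih acc (s + x)]
      · rw [goA_cons2, goA_cons2, if_pos (by simpa using h), if_pos (by simpa using h),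
          ih (acc ++ [s + x]) 0, ih ([] ++ [s + x]) 0]
        simp

theorem altFinish_cons (p : Int × Int) (t : List (Int × Int)) (h : t ≠ []) :
    altFinish (p :: t) = p :: altFinish t := by
  cases t with
  | nil => exact absurd rfl h
  | cons q t' =>
    cases hlast : (q :: t').getLast? with
    | none => simp at hlast
    | some w =>
      obtain ⟨v, s⟩ := w
      simp only [altFinish, List.getLast?_cons_cons, hlast]
      by_cases hv : v = 0
      · simp [hv, List.dropLast_cons_of_ne_nil (List.cons_ne_nil q t')]
      · simp [hv]

-- A equals B's run list post-processed by the trailing-zero drop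
theorem goA_eq_finish (rest : List Int) :
    ∀ (x s : Int),
      goA [] s (x :: rest) = (altFinish (glue (x, s + x) (chop rest))).map Prod.snd := by
  induction rest with
  | nil =>
    intro x s
    by_cases h : x = 0 <;> simp [goA_single, glue, chop, altFinish, h]
  | cons y r ih =>
    intro x s
    have hchop : chop (y :: r) = glue (y, y) (chop r) := by simp [chop]
    by_cases h : x = y
    · subst h
      rw [goA_cons2, if_neg (by simp), ih x (s + x), hchop, glue_glue, add_assoc]
    · rw [goA_cons2, if_pos (by simpa using h), goA_acc, ih y 0, hchop,
        glue_of_ne x (s + x) y y (chop r) h, altFinish_cons _ _ (glue_ne_nil _ _)]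
      simp

-- the last run's value is the list's last element
theorem last_fst (rest : List Int) :
    ∀ (x s : Int), ∃ q : Int × Int,
      (glue (x, s) (chop rest)).getLast? = some q ∧ q.1 = (x :: rest).getLast (by simp) := by
  induction rest with
  | nil => intro x s; exact ⟨(x, s), by simp [glue, chop], by simp⟩
  | cons y r ih =>
    intro x s
    have hchop : chop (y :: r) = glue (y, y) (chop r) := by simp [chop]
    by_cases h : x = y
    · subst h
      rw [hchop, glue_glue]
      obtain ⟨q, hq, hq1⟩ := ih x (s + x)
      refine ⟨q, hq, ?_⟩
      rw [hq1]
      cases r <;> simp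
    · rw [hchop, glue_of_ne x s y y (chop r) h]
      obtain ⟨q, hq, hq1⟩ := ih y y
      cases hg : glue (y, y) (chop r) with
      | nil => exact absurd hg (glue_ne_nil _ _)
      | cons z t =>
          rw [hg] at hq
          refine ⟨q, ?_, by rw [hq1]; simp⟩
          rw [List.getLast?_cons_cons, hq]

-- every run with value 0 has sum 0
theorem chop_zero_sum (xs : List Int) :
    ∀ p ∈ chop xs, p.1 = 0 → p.2 = 0 := by
  induction xs with
  | nil => intro p hp; simp [chop] at hp
  | cons x r ih =>
    intro p hp h0
    have hc : chop (x :: r) = glue (x, x) (chop r) := by simp [chop]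
    rw [hc] at hp
    cases hr : chop r with
    | nil => rw [hr] at hp; simp [glue] at hp; subst hp; simpa using h0
    | cons q t =>
      obtain ⟨w, b⟩ := q
      rw [hr] at hp
      by_cases hw : x = w
      · subst hw
        simp [glue] at hp
        rcases hp with hp | hp
        · subst hp
          simp at h0 ⊢
          have hb := ih (x, b) (by rw [hr]; simp) (by simpa using h0)
          simp at hb; omega
        · exact ih p (by rw [hr]; simp [hp]) h0
      · simp [glue, hw] at hp
        rcases hp with hp | hp
        · subst hp; simpa using h0
        · exact ih p (by rw [hr]; simp [hp]) h0

theorem add_up_eq_finish (xs : List Int) :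
    add_up_identical_neighbours xs
      = (altFinish (xs.foldl altInsert [])).map Prod.snd := by
  cases xs with
  | nil => rfl
  | cons x rest =>
    unfold add_up_identical_neighbours
    rw [alt_eq_chop, goA_eq_finish rest x 0, zero_add]

theorem altFinish_of_last_ne (t : List (Int × Int)) (q : Int × Int)
    (hq : t.getLast? = some q) (h0 : q.1 ≠ 0) : altFinish t = t := by
  obtain ⟨v, s⟩ := q
  simp only [altFinish, hq]
  simp at h0
  simp [h0]

-- ===== VERDICT (by name: the statement is the Claim_ definition above) =====
theorem add_up_identical_neighbours_spec : Claim_unchanged_add_up_identical_neighbours := by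
  intro xs _ hD
  show add_up_identical_neighbours xs = add_up_identical_neighbours_alt xs
  cases xs with
  | nil => rfl
  | cons x rest =>
    rw [add_up_eq_finish]
    unfold add_up_identical_neighbours_alt
    obtain ⟨q, hq, hq1⟩ := last_fst rest x x
    rw [alt_eq_chop]
    rw [altFinish_of_last_ne _ q hq ?_]
    intro hc
    apply hD
    show (x :: rest).getLast? = some 0
    rw [List.getLast?_eq_some_getLast (by simp : (x :: rest) ≠ []), ← hq1, hc]

theorem add_up_identical_neighbours_changed : Claim_changed_add_up_identical_neighbours := by
  unfold Claim_changed_add_up_identical_neighbours; decide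

theorem add_up_identical_neighbours_tight : Claim_exact_add_up_identical_neighbours := by
  intro xs _ hD
  cases xs with
  | nil => simp [D_add_up_identical_neighbours] at hD
  | cons x rest =>
    obtain ⟨q, hq, hq1⟩ := last_fst rest x x
    have hq10 : q.1 = 0 := by
      have : (x :: rest).getLast (by simp) = 0 := by
        have := hD
        unfold D_add_up_identical_neighbours at this
        rw [List.getLast?_eq_some_getLast (by simp : (x :: rest) ≠ [])] at this
        simpa using this
      rw [hq1, this]
    have hq20 : q.2 = 0 := by
      have hmem : q ∈ glue (x, x) (chop rest) := List.mem_of_getLast? hq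
      -- q is either the glued head (x,x) or a member of chop rest; handle via chop of the full list
      have : glue (x, x) (chop rest) = chop (x :: rest) := by simp [chop]
      rw [this] at hmem
      exact chop_zero_sum (x :: rest) q hmem hq10
    -- A's output is B's with the last entry (sum 0) dropped: lengths differ
    rw [add_up_eq_finish]
    unfold add_up_identical_neighbours_alt
    rw [alt_eq_chop]
    set t := glue (x, x) (chop rest) with ht
    have htne : t ≠ [] := glue_ne_nil _ _
    have hfin : altFinish t = t.dropLast := by
      obtain ⟨v, s⟩ := q
      simp only [altFinish, hq]
      simp at hq10
      simp [hq10]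
    rw [hfin]
    intro hcontra
    have hlen := congrArg List.length hcontra
    simp [List.length_dropLast] at hlen
    have : 0 < t.length := List.length_pos_of_ne_nil htne
    omega
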